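-- pv_equiv track=rewrite | github.com/KorfLab/imeter | ime_drafting/imelib.py | kmercount
-- ===== SOURCE A (Python) =====
-- import itertools as iter
--
-- def generatefilters(): #generates a list of legal kmers. in the future, user specified exceptions could be handled
--     filter = {}
--     perms = list(iter.product('ACTG', repeat=5))
--     for i in range(0, len(perms)):
--         perms[i] = ''.join(perms[i])
--         filter[perms[i]] = 1
--     return(filter)
--
-- def kmercount(seqs, k): #determines the total count of kmers in the sequences
--     don = 5 #donor seqeuence
--     acc = 10 #acceptor sequence. we're...hardcoding these, I guess. Not a fan. Will these ever need to change?
--     total = 0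
--     decay = 1
--     count = {}
--     filter = generatefilters() #a dictionary of all the possible legal kmers. reformatting to dictionary drastically cuts down processing time
--
--     for s in seqs:
--         for i in range(don, len(s[1])-k+1-acc):
--             kmer = s[1][i:i+k]
--             if kmer in filter: #this is a CPU sink, really big O
--                 if kmer not in count:
--                     count[kmer] = 0
--                 count[kmer] += decay #to factor in geom decay, to account for intron significance dropping off as it lengthens
--                 total += decay #pretty sure we want to make the total with the decay as well
--                 #some sort of decay function goes here...
--
--     return(count, total) #returns a tuple, a dictionary keyed with unique kmers and their counts, and the total number)
-- ===== SOURCE B (Python) =====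
-- def kmercount(seqs, k):
--     if k != 5:
--         return {}, 0
--     count = {}
--     total = 0
--     for s in seqs:
--         seq = s[1]
--         run = 0  # length of the current streak of legal (uppercase ACTG) characters
--         for j, c in enumerate(seq):
--             run = run + 1 if c in 'ACTG' else 0
--             i = j - 4
--             if run >= 5 and 5 <= i and i < len(seq) - 14:
--                 kmer = seq[i:j + 1]
--                 count[kmer] = count.get(kmer, 0) + 1
--                 total += 1
--     return count, total
-- ===== Notes on version B (the rewrite author's own statement) =====
-- stated objective: alternative
-- what changed: B returns ({},0) immediately for k!=5 (A's 1024-entry table admits only length-5 kmers) and for k=5 replaces the precomputed legality table and per-window slice-and-lookup by a single character-level scan per sequence that maintains a run length of consecutive ACTG characters, emitting and counting a window exactly when the run reaches 5 at an in-range position.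
-- intended difference: For k < 0 where some sequence has length exactly 5-k with all-ACTG characters at positions i..i+4 for some 5 <= i < -k, Python's negative slice stop wraps around (s[1][i:i+k] becomes the length-5 window s[1][i:i+5]) and A returns a nonzero accidental count (e.g. ({'AAAAA': 5}, 5) on the witness); B returns ({}, 0), the intended value, since for a negative window size nothing should be counted. — e.g. on kmercount([("x", "AAAAAAAAAAAAAAA")], -10): A returns ([("AAAAA", 5)], 5), B returns ([], 0)
import Mathlib
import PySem

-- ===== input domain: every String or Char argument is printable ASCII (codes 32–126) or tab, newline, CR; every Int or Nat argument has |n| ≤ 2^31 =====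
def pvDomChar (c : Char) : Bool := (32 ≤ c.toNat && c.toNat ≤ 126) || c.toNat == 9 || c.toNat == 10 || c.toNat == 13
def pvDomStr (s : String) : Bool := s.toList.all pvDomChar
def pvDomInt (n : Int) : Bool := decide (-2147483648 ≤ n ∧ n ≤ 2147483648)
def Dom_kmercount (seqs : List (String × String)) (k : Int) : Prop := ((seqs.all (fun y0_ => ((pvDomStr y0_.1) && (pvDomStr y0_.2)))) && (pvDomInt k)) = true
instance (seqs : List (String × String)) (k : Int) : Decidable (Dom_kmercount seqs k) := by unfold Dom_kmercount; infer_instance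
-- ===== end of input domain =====

-- B drops A's precomputed 1024-entry legal-kmer table: it returns ({},0) at once for k ≠ 5
-- and otherwise scans each sequence once, maintaining a run length of consecutive ACTG
-- characters and counting a window exactly when the run reaches 5 at an in-range position
-- (objective: alternative); on the D_ inputs below (negative k whose slice stop wraps
-- around) B intentionally returns ({},0) where A counts accidental windows.

-- ===== PORT A =====
-- itertools.product('ACTG', repeat=n): leftmost position varies slowest, as in CPython
def pvProd : Nat → List (List Char)
  | 0 => [[]]
  | n + 1 => (['A', 'C', 'T', 'G'].flatMap fun c => (pvProd n).map (c :: ·))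

def generatefilters : PySem.Dict String Int :=
  ((pvProd 5).map (fun cs => String.ofList cs)).foldl
    (fun d s => d.insert s 1) PySem.Dict.empty

-- body of A's inner loop over i
def pvAinner (flt : PySem.Dict String Int) (k : Int) (seq : String)
    (st : PySem.Dict String Int × Int) (i : Int) : PySem.Dict String Int × Int :=
  let kmer := String.ofList (PySem.List.slice seq.toList (some i) (some (i + k)))
  if flt.contains kmer then
    let count := if st.1.contains kmer then st.1 else st.1.insert kmer 0
    (count.insert kmer (count.getD kmer 0 + 1), st.2 + 1)
  else st

def kmercount (seqs : List (String × String)) (k : Int) : (List (String × Int)) × Int :=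
  let flt := generatefilters
  let res := seqs.foldl
    (fun st s =>
      (PySem.List.pyRange 5 ((s.2.toList.length : Int) - k + 1 - 10) 1).foldl
        (pvAinner flt k s.2) st)
    (PySem.Dict.empty, 0)
  (res.1.items, res.2)

-- ===== PORT B =====
def pvLegalChar (c : Char) : Bool := (['A', 'C', 'T', 'G'] : List Char).contains c

-- body of B's inner loop over (j, c) = enumerate(seq); state is (run, count, total)
def pvBinner (cs : List Char) (st : Int × PySem.Dict String Int × Int)
    (p : Int × Char) : Int × PySem.Dict String Int × Int :=
  let run := if pvLegalChar p.2 then st.1 + 1 else 0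
  let i := p.1 - 4
  if 5 ≤ run ∧ 5 ≤ i ∧ i < (cs.length : Int) - 14 then
    let kmer := String.ofList (PySem.List.slice cs (some i) (some (p.1 + 1)))
    (run, st.2.1.insert kmer (st.2.1.getD kmer 0 + 1), st.2.2 + 1)
  else (run, st.2.1, st.2.2)

def kmercount_alt (seqs : List (String × String)) (k : Int) : (List (String × Int)) × Int :=
  if k ≠ 5 then ((PySem.Dict.empty : PySem.Dict String Int).items, 0)
  else
    let res := seqs.foldl
      (fun st s =>
        let r := (PySem.List.enumerate s.2.toList 0).foldl (pvBinner s.2.toList) (0, st.1, st.2)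
        (r.2.1, r.2.2))
      ((PySem.Dict.empty : PySem.Dict String Int), (0 : Int))
    (res.1.items, res.2)

-- ===== PRECONDITION & SPEC =====
-- For k < 0 where some sequence has length exactly 5-k and all-ACTG characters at positions
-- i..i+4 for some 5 ≤ i < -k, Python's negative slice stop wraps (s[1][i:i+k] becomes the
-- length-5 window s[1][i:i+5]) and A returns a nonzero accidental count; B returns ({}, 0),
-- the intended value, since for a negative window size k nothing should be counted.
def D_kmercount (seqs : List (String × String)) (k : Int) : Prop :=
  k < 0 ∧ ∃ s ∈ seqs, (s.2.toList.length : Int) = 5 - k ∧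
    ∃ i < s.2.toList.length, 5 ≤ i ∧ (i : Int) < -k ∧
      ((s.2.toList.drop i).take 5).all
        (fun c => c == 'A' || c == 'C' || c == 'T' || c == 'G') = true
instance (seqs : List (String × String)) (k : Int) : Decidable (D_kmercount seqs k) := by unfold D_kmercount; infer_instance

def Spec_kmercount (seqs : List (String × String)) (k : Int) (out : (List (String × Int)) × Int) : Prop := ¬ D_kmercount seqs k → out = kmercount_alt seqs k
instance (seqs : List (String × String)) (k : Int) (out : (List (String × Int)) × Int) : Decidable (Spec_kmercount seqs k out) := by unfold Spec_kmercount; infer_instance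

def pvDiffWitness_kmercount : (List (String × String)) × Int :=
  ([("x", "AAAAAAAAAAAAAAA")], -10)
def pvDiffWitnessOut_kmercount : ((List (String × Int)) × Int) × ((List (String × Int)) × Int) :=
  (([("AAAAA", 5)], 5), ([], 0))

-- ===== CLAIM (what is proved, stated in full; the proofs are below) =====
def Claim_unchanged_kmercount : Prop := ∀ (seqs : List (String × String)) (k : Int), Dom_kmercount seqs k → Spec_kmercount seqs k (kmercount seqs k)
def Claim_changed_kmercount : Prop := Dom_kmercount (pvDiffWitness_kmercount.1) (pvDiffWitness_kmercount.2) ∧ D_kmercount (pvDiffWitness_kmercount.1) (pvDiffWitness_kmercount.2) ∧ kmercount (pvDiffWitness_kmercount.1) (pvDiffWitness_kmercount.2) = pvDiffWitnessOut_kmercount.1 ∧ kmercount_alt (pvDiffWitness_kmercount.1) (pvDiffWitness_kmercount.2) = pvDiffWitnessOut_kmercount.2 ∧ pvDiffWitnessOut_kmercount.1 ≠ pvDiffWitnessOut_kmercount.2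
def Claim_exact_kmercount : Prop := ∀ (seqs : List (String × String)) (k : Int), Dom_kmercount seqs k → D_kmercount seqs k → kmercount seqs k ≠ kmercount_alt seqs k

-- ===== LEMMAS AND PROOFS =====

-- per-character legality written as a window predicate (proof-side only)
def pvLegal (cs : List Char) : Bool :=
  cs.length == 5 && cs.all pvLegalChar

-- the counting insert both programs perform on a legal kmer
def pvCountIns (d : PySem.Dict String Int) (km : String) : PySem.Dict String Int :=
  d.insert km (d.getD km 0 + 1)

-- the legal windows A's loop tests for one sequence, in scan order (any k)
def pvWk (k : Int) (cs : List Char) : List String :=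
  ((PySem.List.pyRange 5 ((cs.length : Int) - k + 1 - 10) 1).map
      (fun i => String.ofList (PySem.List.slice cs (some i) (some (i + k))))).filter
    (fun km => pvLegal km.toList)

-- the same for k = 5, the only case where ordinary windows can be legal
def pvW (cs : List Char) : List String :=
  ((PySem.List.pyRange 5 ((cs.length : Int) - 14) 1).map
      (fun i => String.ofList (PySem.List.slice cs (some i) (some (i + 5))))).filter
    (fun km => pvLegal km.toList)

-- B's run-length state after a prefix
def pvRun (p : List Char) : Nat :=
  p.foldl (fun r c => if pvLegalChar c then r + 1 else 0) 0

-- the window B emits at scan position j (none if out of range or illegal)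
def pvE (cs : List Char) (j : Int) : Option String :=
  if 5 ≤ j - 4 ∧ j - 4 < (cs.length : Int) - 14 ∧
      ((cs.drop (j - 4).toNat).take 5).all pvLegalChar
  then some (String.ofList ((cs.drop (j - 4).toNat).take 5)) else none

theorem pv_legalChar_eq :
    pvLegalChar = (fun c => c == 'A' || c == 'C' || c == 'T' || c == 'G') := by
  funext c
  rw [pvLegalChar, Bool.eq_iff_iff]
  simp [beq_iff_eq]
  tauto

theorem pv_legal_of_len (xs : List Char) (h : xs.length ≠ 5) : pvLegal xs = false := by
  simp [pvLegal, h]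

theorem pv_slice_eq (cs : List Char) (a b : Int) :
    PySem.List.slice cs (some a) (some b)
    = (cs.drop (PySem.List.clampIdx cs.length a)).take
        (PySem.List.clampIdx cs.length b - PySem.List.clampIdx cs.length a) := by
  rfl

-- ----- A-side lemmas (filter table = legality predicate, loop = fold over pvWk) -----

theorem pv_mem_prod (n : Nat) (cs : List Char) :
    cs ∈ pvProd n ↔ cs.length = n ∧ ∀ c ∈ cs, pvLegalChar c := by
  induction n generalizing cs with
  | zero =>
    simp only [pvProd, List.mem_singleton, List.length_eq_zero_iff]
    constructor
    · rintro rfl; simp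
    · rintro ⟨rfl, _⟩; rfl
  | succ n ih =>
    simp only [pvProd, List.mem_flatMap, List.mem_map]
    constructor
    · rintro ⟨c, hc, cs', hcs', rfl⟩
      rcases (ih cs').1 hcs' with ⟨hl, hall⟩
      refine ⟨by simp [hl], ?_⟩
      intro x hx
      rcases List.mem_cons.1 hx with rfl | hx
      · simpa [pvLegalChar] using hc
      · exact hall x hx
    · rintro ⟨hl, hall⟩
      cases cs with
      | nil => simp at hl
      | cons c cs' =>
        refine ⟨c, by simpa [pvLegalChar] using hall c (by simp), cs',
          (ih cs').2 ⟨by simpa using hl, ?_⟩, rfl⟩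
        intro x hx; exact hall x (List.mem_cons_of_mem _ hx)

theorem pv_contains_fold (L : List String) (d : PySem.Dict String Int) (km : String) :
    (L.foldl (fun d s => d.insert s 1) d).contains km = (d.contains km || decide (km ∈ L)) := by
  induction L generalizing d with
  | nil => simp
  | cons s L ih =>
    simp only [List.foldl_cons, ih, PySem.Dict.contains_insert]
    by_cases h : km = s
    · simp [h]
    · have hb : (km == s) = false := beq_eq_false_iff_ne.2 h
      simp [hb, h]

theorem pv_contains_generatefilters (km : String) :
    generatefilters.contains km = pvLegal km.toList := by
  rw [generatefilters, pv_contains_fold]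
  simp only [PySem.Dict.contains_empty, Bool.false_or]
  have hmem : km ∈ (pvProd 5).map (fun cs => String.ofList cs) ↔ km.toList ∈ pvProd 5 := by
    constructor
    · rintro hm
      rcases List.mem_map.1 hm with ⟨cs, hcs, rfl⟩
      simpa [String.toList_ofList] using hcs
    · intro h
      exact List.mem_map.2 ⟨km.toList, h, by simp⟩
  rw [Bool.eq_iff_iff]
  simp only [decide_eq_true_eq, hmem, pv_mem_prod, pvLegal, Bool.and_eq_true, beq_iff_eq,
    List.all_eq_true]

-- A's "ensure key then += 1" equals the single counting insert
theorem pv_upd_eq (d : PySem.Dict String Int) (km : String) :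
    (if d.contains km then d else d.insert km 0).insert km
      ((if d.contains km then d else d.insert km 0).getD km 0 + 1)
    = pvCountIns d km := by
  rw [pvCountIns]
  by_cases h : d.contains km = true
  · simp [h]
  · simp only [h, Bool.false_eq_true, if_false]
    rw [PySem.Dict.getD_insert_self, PySem.Dict.insert_insert_self,
      PySem.Dict.getD_of_not_contains d 0 (by simpa using h)]

-- A's inner index loop = fold of the counting insert over the legal windows (any k)
theorem pv_a_inner_fold (k : Int) (seq : String)
    (r : List Int) (d : PySem.Dict String Int) (t : Int) :
    r.foldl (pvAinner generatefilters k seq) (d, t)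
    = (((r.map (fun i => String.ofList (PySem.List.slice seq.toList (some i) (some (i + k))))).filter
          (fun km => pvLegal km.toList)).foldl pvCountIns d,
       t + ((r.map (fun i => String.ofList (PySem.List.slice seq.toList (some i) (some (i + k))))).filter
          (fun km => pvLegal km.toList)).length) := by
  induction r generalizing d t with
  | nil => simp
  | cons i r ih =>
    simp only [List.foldl_cons, List.map_cons, List.filter_cons, String.toList_ofList]
    by_cases h : pvLegal (PySem.List.slice seq.toList (some i) (some (i + k))) = true
    · rw [show pvAinner generatefilters k seq (d, t) i
          = (pvCountIns d (String.ofList (PySem.List.slice seq.toList (some i) (some (i + k)))), t + 1) by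
        simp only [pvAinner, pv_contains_generatefilters, String.toList_ofList, h, if_true]
        rw [pv_upd_eq]]
      rw [ih]
      simp only [h, if_true, List.foldl_cons, List.length_cons, Prod.mk.injEq]
      exact ⟨trivial, by omega⟩
    · rw [show pvAinner generatefilters k seq (d, t) i = (d, t) by
        simp only [pvAinner, pv_contains_generatefilters, String.toList_ofList]
        simp [h]]
      rw [ih]
      simp [h]

-- A's whole loop, as a fold over the concatenated legal windows
theorem pv_a_outer (k : Int) (seqs : List (String × String))
    (d : PySem.Dict String Int) (t : Int) :
    seqs.foldl
      (fun st s =>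
        (PySem.List.pyRange 5 ((s.2.toList.length : Int) - k + 1 - 10) 1).foldl
          (pvAinner generatefilters k s.2) st) (d, t)
    = ((seqs.flatMap (fun s => pvWk k s.2.toList)).foldl pvCountIns d,
       t + (seqs.flatMap (fun s => pvWk k s.2.toList)).length) := by
  induction seqs generalizing d t with
  | nil => simp
  | cons s seqs ih =>
    simp only [List.foldl_cons, List.flatMap_cons]
    rw [show (PySem.List.pyRange 5 ((s.2.toList.length : Int) - k + 1 - 10) 1).foldl
          (pvAinner generatefilters k s.2) (d, t)
        = ((pvWk k s.2.toList).foldl pvCountIns d, t + ((pvWk k s.2.toList).length : Int)) from by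
      rw [pv_a_inner_fold k s.2 _ d t]
      rfl]
    rw [ih, List.foldl_append, List.length_append]
    refine Prod.ext rfl ?_
    push_cast
    ring

theorem pv_kmercount_eq (seqs : List (String × String)) (k : Int) :
    kmercount seqs k
    = (((seqs.flatMap (fun s => pvWk k s.2.toList)).foldl pvCountIns PySem.Dict.empty).items,
       ((seqs.flatMap (fun s => pvWk k s.2.toList)).length : Int)) := by
  simp only [kmercount]
  rw [pv_a_outer k seqs PySem.Dict.empty 0, zero_add]

-- for k ≠ 5 a window A tests is legal only via the D_ wraparound; otherwise it is illegal
theorem pv_window_illegal (cs : List Char) (k i : Int) (hk : k ≠ 5) (h5 : 5 ≤ i)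
    (hi : i < (cs.length : Int) - k + 1 - 10)
    (hD : ∀ j : Nat, j < cs.length → 5 ≤ j → (j : Int) < -k →
      (cs.length : Int) = 5 - k → ¬(((cs.drop j).take 5).all pvLegalChar = true)) :
    pvLegal (PySem.List.slice cs (some i) (some (i + k))) = false := by
  by_cases hkpos : 0 ≤ k
  · rw [PySem.List.slice_toNat cs (by omega) (by omega)]
    apply pv_legal_of_len
    rw [List.length_take, List.length_drop]
    omega
  · by_cases hib : 0 ≤ i + k
    · rw [PySem.List.slice_toNat cs (by omega) hib]
      apply pv_legal_of_len
      rw [List.length_take, List.length_drop]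
      omega
    · have ha : PySem.List.clampIdx cs.length i = min i.toNat cs.length := by
        unfold PySem.List.clampIdx
        rw [if_neg (by omega)]
      by_cases hw : (cs.length : Int) + (i + k) < 0
      · have hb : PySem.List.clampIdx cs.length (i + k) = 0 := by
          unfold PySem.List.clampIdx
          rw [if_pos (by omega), if_pos hw]
        rw [pv_slice_eq]
        apply pv_legal_of_len
        rw [ha, hb, List.length_take, List.length_drop]
        omega
      · have hb : PySem.List.clampIdx cs.length (i + k)
            = ((cs.length : Int) + (i + k)).toNat := by
          unfold PySem.List.clampIdx
          rw [if_pos (by omega), if_neg hw]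
        by_cases hL : (cs.length : Int) = 5 - k
        · have hilen : i.toNat < cs.length := by omega
          rw [pv_slice_eq,
            show (cs.drop (PySem.List.clampIdx cs.length i)).take
                (PySem.List.clampIdx cs.length (i + k) - PySem.List.clampIdx cs.length i)
              = (cs.drop i.toNat).take 5 by
                rw [ha, hb, show min i.toNat cs.length = i.toNat by omega]
                congr 1
                omega]
          have hfalse : ((cs.drop i.toNat).take 5).all pvLegalChar = false := by
            simpa using hD i.toNat hilen (by omega) (by omega) hL
          simp [pvLegal, hfalse]
        · rw [pv_slice_eq]
          apply pv_legal_of_len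
          rw [ha, hb, List.length_take, List.length_drop]
          omega

theorem pv_Wk_nil (cs : List Char) (k : Int) (hk : k ≠ 5)
    (hD : ∀ j : Nat, j < cs.length → 5 ≤ j → (j : Int) < -k →
      (cs.length : Int) = 5 - k → ¬(((cs.drop j).take 5).all pvLegalChar = true)) :
    pvWk k cs = [] := by
  rw [pvWk, List.filter_eq_nil_iff]
  intro km hkm
  rcases List.mem_map.1 hkm with ⟨i, hi, rfl⟩
  rcases (PySem.List.mem_pyRange_one).1 hi with ⟨hi1, hi2⟩
  rw [String.toList_ofList, pv_window_illegal cs k i hk hi1 hi2 hD]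
  simp

-- ----- B-side lemmas (run-length scan = fold over the same legal windows) -----

theorem pv_run_append (p : List Char) (c : Char) :
    pvRun (p ++ [c]) = if pvLegalChar c then pvRun p + 1 else 0 := by
  simp [pvRun, List.foldl_append]

-- the run after a prefix is ≥ m iff the last m characters are all legal
theorem pv_run_ge (p : List Char) (m : Nat) :
    m ≤ pvRun p ↔ m ≤ p.length ∧ (p.drop (p.length - m)).all pvLegalChar := by
  induction p using List.reverseRecOn generalizing m with
  | nil => simp [pvRun]
  | append_singleton p c ih =>
    rw [pv_run_append]
    by_cases hc : pvLegalChar c = true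
    · rw [if_pos hc]
      cases m with
      | zero => simp
      | succ m' =>
        have hd : (p ++ [c]).drop ((p ++ [c]).length - (m' + 1)) = p.drop (p.length - m') ++ [c] := by
          rw [List.drop_append_of_le_length (by simp)]
          congr 1
          simp
        rw [hd]
        simp only [List.all_append, List.length_append, List.length_singleton]
        rw [Nat.add_le_add_iff_right, ih m']
        simp [hc]
    · rw [if_neg hc]
      cases m with
      | zero => simp
      | succ m' =>
        have hd : (p ++ [c]).drop ((p ++ [c]).length - (m' + 1)) = p.drop (p.length - m') ++ [c] := by
          rw [List.drop_append_of_le_length (by simp)]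
          congr 1
          simp
        rw [hd]
        simp [hc]

-- one step of B's scan, in terms of the emitted window pvE
theorem pv_b_step (cs : List Char) (j : Nat) (hj : j < cs.length)
    (d : PySem.Dict String Int) (t : Int) :
    pvBinner cs ((pvRun (cs.take j) : Int), d, t) ((j : Int), cs[j])
    = ((pvRun (cs.take (j + 1)) : Int),
       match pvE cs j with
       | some w => (pvCountIns d w, t + 1)
       | none => (d, t)) := by
  have htake : cs.take (j + 1) = cs.take j ++ [cs[j]] := by
    rw [List.take_add_one, List.getElem?_eq_getElem hj]
    rfl
  have hrun : (if pvLegalChar cs[j] then (pvRun (cs.take j) : Int) + 1 else 0)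
      = (pvRun (cs.take (j + 1)) : Int) := by
    rw [htake, pv_run_append]
    split <;> push_cast <;> ring
  simp only [pvBinner, hrun]
  by_cases hb : 5 ≤ (j : Int) - 4 ∧ (j : Int) - 4 < (cs.length : Int) - 14
  · have hj4 : ((j : Int) - 4).toNat = j - 4 := by omega
    have hslice : PySem.List.slice cs (some ((j : Int) - 4)) (some ((j : Int) + 1))
        = (cs.drop (j - 4)).take 5 := by
      rw [PySem.List.slice_toNat cs (by omega : (0:Int) ≤ (j:Int)-4) (by omega : (0:Int) ≤ (j:Int)+1), hj4]
      congr 1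
      omega
    have hwin : (cs.take (j + 1)).drop ((cs.take (j + 1)).length - 5) = (cs.drop (j - 4)).take 5 := by
      have hlength : (cs.take (j + 1)).length = j + 1 := by
        rw [List.length_take]
        omega
      have h1 : j + 1 - 5 = j - 4 := by omega
      rw [hlength, List.drop_take, h1]
      congr 1
      omega
    have hiff : (5 ≤ (pvRun (cs.take (j + 1)) : Int))
        ↔ (((cs.drop (j - 4)).take 5).all pvLegalChar = true) := by
      rw [show ((5:Int) ≤ (pvRun (cs.take (j+1)) : Int)) ↔ 5 ≤ pvRun (cs.take (j+1)) by
        exact_mod_cast Iff.rfl]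
      rw [pv_run_ge, hwin]
      have : 5 ≤ (cs.take (j + 1)).length := by rw [List.length_take]; omega
      tauto
    simp only [pvE, hj4]
    by_cases hall : ((cs.drop (j - 4)).take 5).all pvLegalChar = true
    · rw [if_pos ⟨hiff.2 hall, hb.1, hb.2⟩, if_pos ⟨hb.1, hb.2, hall⟩]
      rw [hslice]
      simp only [pvCountIns]
    · rw [if_neg (by tauto), if_neg (by tauto)]
  · rw [if_neg (by tauto)]
    simp only [pvE]
    rw [if_neg (by tauto)]

-- B's scan over the suffix starting at j
theorem pv_b_loop (cs : List Char) (tail : List Char) (j : Nat)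
    (h : cs.drop j = tail) (d : PySem.Dict String Int) (t : Int) :
    (PySem.List.enumerate tail (j : Int)).foldl (pvBinner cs) ((pvRun (cs.take j) : Int), d, t)
    = ((pvRun cs : Int),
       ((PySem.List.pyRange (j : Int) (cs.length : Int) 1).filterMap (pvE cs)).foldl pvCountIns d,
       t + ((PySem.List.pyRange (j : Int) (cs.length : Int) 1).filterMap (pvE cs)).length) := by
  induction tail generalizing j d t with
  | nil =>
    have hlen : cs.length ≤ j := List.drop_eq_nil_iff.1 h
    rw [List.take_of_length_le hlen,
      PySem.List.pyRange_one_eq_nil (by exact_mod_cast hlen)]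
    simp [PySem.List.enumerate]
  | cons c tl ih =>
    have hj : j < cs.length := by
      by_contra hc
      rw [List.drop_eq_nil_iff.2 (by omega)] at h
      exact List.cons_ne_nil c tl h.symm
    rw [List.drop_eq_getElem_cons hj] at h
    injection h with h1 h2
    subst h1
    rw [PySem.List.enumerate_cons, List.foldl_cons, pv_b_step cs j hj d t,
      PySem.List.pyRange_one_cons (by exact_mod_cast hj)]
    cases hE : pvE cs (j : Int) with
    | some w =>
      simp only [List.filterMap_cons, hE, List.foldl_cons, List.length_cons]
      have hstep := ih (j + 1) h2 (pvCountIns d w) (t + 1)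
      push_cast at hstep ⊢
      rw [hstep]
      refine Prod.ext rfl (Prod.ext rfl ?_)
      push_cast
      ring
    | none =>
      simp only [List.filterMap_cons, hE]
      have hstep := ih (j + 1) h2 d t
      push_cast at hstep ⊢
      rw [hstep]

theorem pv_filter_map_eq_filterMap {α β : Type} (f : α → β) (p : β → Bool) (l : List α) :
    (l.map f).filter p = l.filterMap (fun x => if p (f x) then some (f x) else none) := by
  induction l with
  | nil => simp
  | cons x l ih =>
    simp only [List.map_cons, List.filter_cons, List.filterMap_cons]
    split <;> simp [ih]

-- the windows B emits are exactly A's legal windows for k = 5, in the same order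
theorem pv_emit_eq_W (cs : List Char) :
    (PySem.List.pyRange 0 (cs.length : Int) 1).filterMap (pvE cs) = pvW cs := by
  have hmap : (PySem.List.pyRange 0 (cs.length : Int) 1).map (fun j => j - 4)
      = PySem.List.pyRange (-4) ((cs.length : Int) - 4) 1 := by
    rw [PySem.List.pyRange_one, PySem.List.pyRange_one, List.map_map]
    rw [show ((cs.length : Int) - 4 - (-4)).toNat = ((cs.length : Int) - 0).toNat by omega]
    apply List.map_congr_left
    intro k _
    simp
    ring
  have hE : (PySem.List.pyRange 0 (cs.length : Int) 1).filterMap (pvE cs)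
      = (PySem.List.pyRange (-4) ((cs.length : Int) - 4) 1).filterMap
          (fun i => if 5 ≤ i ∧ i < (cs.length : Int) - 14 ∧
              ((cs.drop i.toNat).take 5).all pvLegalChar
            then some (String.ofList ((cs.drop i.toNat).take 5)) else none) := by
    rw [← hmap, List.filterMap_map]
    rfl
  rw [hE, pvW]
  by_cases hL : (5 : Int) ≤ (cs.length : Int) - 14
  · rw [PySem.List.pyRange_one_append (-4) 5 ((cs.length : Int) - 4) (by omega) (by omega),
      PySem.List.pyRange_one_append 5 ((cs.length : Int) - 14) ((cs.length : Int) - 4) hL (by omega),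
      List.filterMap_append, List.filterMap_append]
    rw [show (PySem.List.pyRange (-4) 5 1).filterMap _ = [] from List.filterMap_eq_nil_iff.mpr ?_,
      show (PySem.List.pyRange ((cs.length : Int) - 14) ((cs.length : Int) - 4) 1).filterMap _ = []
        from List.filterMap_eq_nil_iff.mpr ?_]
    · rw [List.nil_append, List.append_nil, pv_filter_map_eq_filterMap]
      apply List.filterMap_congr
      intro i hi
      rcases (PySem.List.mem_pyRange_one).1 hi with ⟨hi1, hi2⟩
      have hsl : PySem.List.slice cs (some i) (some (i + 5)) = (cs.drop i.toNat).take 5 := by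
        rw [PySem.List.slice_toNat cs (by omega : (0:Int) ≤ i) (by omega : (0:Int) ≤ i + 5)]
        congr 1
        omega
      have hlen5 : ((cs.drop i.toNat).take 5).length = 5 := by
        rw [List.length_take, List.length_drop]
        omega
      rw [hsl, String.toList_ofList]
      simp only [pvLegal, hlen5]
      simp [hi1, hi2]
    · intro i hi
      rcases (PySem.List.mem_pyRange_one).1 hi with ⟨hi1, hi2⟩
      rw [if_neg (by rintro ⟨h1, h2, -⟩; omega)]
    · intro i hi
      rcases (PySem.List.mem_pyRange_one).1 hi with ⟨hi1, hi2⟩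
      rw [if_neg (by rintro ⟨h1, h2, -⟩; omega)]
  · rw [show PySem.List.pyRange 5 ((cs.length : Int) - 14) 1 = [] from
      PySem.List.pyRange_one_eq_nil (by omega), List.map_nil, List.filter_nil]
    apply List.filterMap_eq_nil_iff.mpr
    intro i hi
    rw [if_neg (by rintro ⟨h1, h2, -⟩; omega)]

-- one sequence of B's outer loop
theorem pv_b_seq (cs : List Char) (d : PySem.Dict String Int) (t : Int) :
    ((PySem.List.enumerate cs 0).foldl (pvBinner cs) (0, d, t)).2
    = ((pvW cs).foldl pvCountIns d, t + ((pvW cs).length : Int)) := by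
  have h0 : ((0 : Nat) : Int) = (0 : Int) := rfl
  have := pv_b_loop cs cs 0 rfl d t
  rw [h0] at this
  simp only [List.take_zero] at this
  rw [show (pvRun ([] : List Char) : Int) = 0 from rfl] at this
  rw [this, pv_emit_eq_W]

theorem pv_b_outer (seqs : List (String × String))
    (d : PySem.Dict String Int) (t : Int) :
    seqs.foldl
      (fun st s =>
        let r := (PySem.List.enumerate s.2.toList 0).foldl (pvBinner s.2.toList) (0, st.1, st.2)
        (r.2.1, r.2.2)) (d, t)
    = ((seqs.flatMap (fun s => pvW s.2.toList)).foldl pvCountIns d,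
       t + ((seqs.flatMap (fun s => pvW s.2.toList)).length : Int)) := by
  induction seqs generalizing d t with
  | nil => simp
  | cons s seqs ih =>
    simp only [List.foldl_cons, List.flatMap_cons]
    rw [show (((PySem.List.enumerate s.2.toList 0).foldl (pvBinner s.2.toList) (0, d, t)).2.1,
        ((PySem.List.enumerate s.2.toList 0).foldl (pvBinner s.2.toList) (0, d, t)).2.2)
      = ((pvW s.2.toList).foldl pvCountIns d, t + ((pvW s.2.toList).length : Int)) from
      pv_b_seq s.2.toList d t]
    rw [ih, List.foldl_append, List.length_append]
    refine Prod.ext rfl ?_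
    push_cast
    ring

theorem pv_b_eq5 (seqs : List (String × String)) :
    kmercount_alt seqs 5
    = (((seqs.flatMap (fun s => pvW s.2.toList)).foldl pvCountIns PySem.Dict.empty).items,
       ((seqs.flatMap (fun s => pvW s.2.toList)).length : Int)) := by
  simp only [kmercount_alt, if_neg (by simp : ¬((5:Int) ≠ 5))]
  rw [pv_b_outer seqs PySem.Dict.empty 0, zero_add]

theorem pv_Wk_five (cs : List Char) : pvWk 5 cs = pvW cs := by
  rw [pvWk, pvW, show (cs.length : Int) - 5 + 1 - 10 = (cs.length : Int) - 14 by ring]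

-- A's length-5 window through the wraparound slice, for the tightness proof
theorem pv_slice_wrap (cs : List Char) (k : Int) (i : Nat)
    (hlen : (cs.length : Int) = 5 - k) (h5 : 5 ≤ i) (hik : (i : Int) < -k) :
    PySem.List.slice cs (some (i : Int)) (some ((i : Int) + k)) = (cs.drop i).take 5 := by
  have ha : PySem.List.clampIdx cs.length (i : Int) = i := by
    unfold PySem.List.clampIdx
    rw [if_neg (by omega)]
    omega
  have hb : PySem.List.clampIdx cs.length ((i : Int) + k) = i + 5 := by
    unfold PySem.List.clampIdx
    rw [if_pos (by omega), if_neg (by omega)]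
    omega
  rw [pv_slice_eq, ha, hb]
  congr 1
  omega

-- ===== VERDICT (by name: the statement is the Claim_ definition above) =====
theorem kmercount_spec : Claim_unchanged_kmercount := by
  intro seqs k _ hnd
  show _ = _
  by_cases hk : k = 5
  · subst hk
    rw [pv_kmercount_eq, pv_b_eq5]
    simp only [pv_Wk_five]
  · rw [pv_kmercount_eq, kmercount_alt, if_pos hk]
    have hnil : seqs.flatMap (fun s => pvWk k s.2.toList) = [] := by
      apply List.flatMap_eq_nil_iff.mpr
      intro s hs
      apply pv_Wk_nil s.2.toList k hk
      intro j hjlen hj5 hjk hL hall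
      by_cases hkneg : k < 0
      · apply hnd
        refine ⟨hkneg, s, hs, hL, j, hjlen, hj5, hjk, ?_⟩
        rw [← pv_legalChar_eq]
        exact hall
      · omega
    rw [hnil]
    simp

theorem kmercount_changed : Claim_changed_kmercount := by
  unfold Claim_changed_kmercount
  refine ⟨by decide, by decide, ?_, by decide, by decide⟩
  rw [pv_kmercount_eq]
  decide

theorem kmercount_tight : Claim_exact_kmercount := by
  intro seqs k _ hD heq
  obtain ⟨hkneg, s, hs, hlen, i, hilen, hi5, hik, hall⟩ := hD
  have hk5 : k ≠ 5 := by omega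
  have h2 := congrArg Prod.snd heq
  rw [pv_kmercount_eq, kmercount_alt, if_pos hk5] at h2
  have hzero : (seqs.flatMap (fun s => pvWk k s.2.toList)).length = 0 := by
    have : ((seqs.flatMap (fun s => pvWk k s.2.toList)).length : Int) = 0 := h2
    exact_mod_cast this
  have hmem : String.ofList ((s.2.toList.drop i).take 5)
      ∈ seqs.flatMap (fun s => pvWk k s.2.toList) := by
    apply List.mem_flatMap.2
    refine ⟨s, hs, ?_⟩
    rw [pvWk]
    apply List.mem_filter.2
    constructor
    · apply List.mem_map.2
      refine ⟨(i : Int), (PySem.List.mem_pyRange_one).2 ⟨by omega, by omega⟩, ?_⟩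
      rw [pv_slice_wrap s.2.toList k i hlen hi5 hik]
    · rw [String.toList_ofList]
      have hlen5 : ((s.2.toList.drop i).take 5).length = 5 := by
        rw [List.length_take, List.length_drop]
        omega
      simp only [pvLegal, hlen5, pv_legalChar_eq]
      simpa using hall
  rw [List.length_eq_zero_iff.1 hzero] at hmem
  exact (List.not_mem_nil) hmem
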